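-- pv_equiv track=rewrite | github.com/MrBrantCode/unitest_baseline | mut_generate/mist_train_cf/cf_7135/solution.py | most_frequent_letter
-- ===== SOURCE A (Python) =====
-- def most_frequent_letter(s):
--     count = {}
--     max_count = 0
--     most_frequent = ''
--     for letter in s:
--         if letter in count:
--             count[letter] += 1
--         else:
--             count[letter] = 1
--         if count[letter] > max_count:
--             max_count = count[letter]
--             most_frequent = letter
--     return most_frequent
-- ===== SOURCE B (Python) =====
-- def most_frequent_letter(s):
--     if not s:
--         return ''
--     freq = {}
--     for c in s:
--         freq[c] = freq.get(c, 0) + 1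
--     m = max(freq.values())
--     running = {}
--     for c in s:
--         running[c] = running.get(c, 0) + 1
--         if running[c] == m:
--             return c
-- ===== Notes on version B (the rewrite author's own statement) =====
-- stated objective: alternative
-- what changed: Replaces A's single-pass running-max update with a two-pass scheme: first build the full frequency dict and take the global maximum m of its values, then scan again and return the first character whose running count reaches m (the same first-to-reach-max tie-break, without tracking a running maximum).
import Mathlib
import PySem

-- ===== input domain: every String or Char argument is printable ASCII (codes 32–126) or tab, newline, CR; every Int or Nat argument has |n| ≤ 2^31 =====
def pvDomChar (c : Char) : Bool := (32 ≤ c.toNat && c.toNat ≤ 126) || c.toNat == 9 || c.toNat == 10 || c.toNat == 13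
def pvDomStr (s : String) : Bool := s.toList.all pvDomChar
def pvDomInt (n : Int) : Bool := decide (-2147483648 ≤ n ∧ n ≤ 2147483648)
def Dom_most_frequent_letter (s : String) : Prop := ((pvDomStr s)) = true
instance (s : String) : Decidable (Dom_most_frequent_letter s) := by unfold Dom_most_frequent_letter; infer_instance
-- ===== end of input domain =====

-- B replaces A's single-pass running-max update by a two-pass scheme (global max frequency,
-- then first character whose running count reaches it); same value on every input.

-- ===== PORT A =====
-- one iteration of A's for-loop: state = (count dict, max_count, most_frequent)
def aStep (st : PySem.Dict Char Int × Int × String) (letter : Char) :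
    PySem.Dict Char Int × Int × String :=
  let count := if st.1.contains letter
    then st.1.insert letter (st.1.getD letter 0 + 1)   -- count[letter] += 1
    else st.1.insert letter 1                           -- count[letter] = 1
  if count.getD letter 0 > st.2.1 then (count, count.getD letter 0, String.ofList [letter])
  else (count, st.2.1, st.2.2)

def most_frequent_letter (s : String) : String :=
  (s.toList.foldl aStep (PySem.Dict.empty, 0, "")).2.2

-- ===== PORT B =====
-- B's second for-loop: running[c] = running.get(c, 0) + 1; return c when running[c] == m
def bLoop (m : Int) (running : PySem.Dict Char Int) : List Char → String
  | [] => ""            -- loop falls through (never reached for the m B computes)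
  | c :: rest =>
    if (running.insert c (running.getD c 0 + 1)).getD c 0 = m then String.ofList [c]
    else bLoop m (running.insert c (running.getD c 0 + 1)) rest

def most_frequent_letter_alt (s : String) : String :=
  if s.toList = [] then ""
  else
    -- first pass: freq[c] = freq.get(c, 0) + 1;  m = max(freq.values())
    let freq := s.toList.foldl (fun d c => d.insert c (d.getD c 0 + 1)) PySem.Dict.empty
    let m := (PySem.List.max? freq.values (fun x => x)).getD 0
    bLoop m PySem.Dict.empty s.toList

-- ===== PRECONDITION & SPEC =====
def Spec_most_frequent_letter (s : String) (out : String) : Prop := out = most_frequent_letter_alt s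
instance (s : String) (out : String) : Decidable (Spec_most_frequent_letter s out) := by unfold Spec_most_frequent_letter; infer_instance

-- ===== CLAIM (what is proved, stated in full; the proofs are below) =====
def Claim_equal_most_frequent_letter : Prop := ∀ (s : String), Dom_most_frequent_letter s → Spec_most_frequent_letter s (most_frequent_letter s)

-- ===== LEMMAS AND PROOFS =====

-- model of A's loop with the dict abstracted to the processed prefix (whose .count is the dict)
def mStep (st : List Char × Int × String) (c : Char) : List Char × Int × String :=
  let p := st.1 ++ [c]
  if ((p.count c : Int)) > st.2.1 then (p, (p.count c : Int), String.ofList [c])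
  else (p, st.2.1, st.2.2)

-- model of B's second loop with the running dict abstracted to the seen prefix
def bLoopL (m : Int) (seen : List Char) : List Char → String
  | [] => ""
  | c :: rest =>
    if ((seen ++ [c]).count c : Int) = m then String.ofList [c]
    else bLoopL m (seen ++ [c]) rest

lemma aStep_eq_mStep (l : List Char) :
    ∀ (cnt : PySem.Dict Char Int) (mc : Int) (mf : String) (p : List Char),
      (∀ x, cnt.getD x 0 = (p.count x : Int)) →
      (l.foldl aStep (cnt, mc, mf)).2 = (l.foldl mStep (p, mc, mf)).2 := by
  induction l with
  | nil => intro _ _ _ _ _; rfl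
  | cons c rest ih =>
    intro cnt mc mf p hinv
    have hgetD : ∀ x, (if cnt.contains c then cnt.insert c (cnt.getD c 0 + 1)
        else cnt.insert c 1).getD x 0 = ((p ++ [c]).count x : Int) := by
      intro x
      by_cases hc : cnt.contains c = true
      · rw [if_pos hc, PySem.Dict.getD_insert, List.count_append]
        split_ifs with hx
        · subst hx; simp [hinv x]
        · simp [Ne.symm hx, hinv x]
      · have h0 : cnt.getD c 0 = 0 :=
          PySem.Dict.getD_of_not_contains cnt 0 (by simpa using hc)
        have hp : (p.count c : Int) = 0 := by rw [← hinv c, h0]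
        rw [if_neg hc, PySem.Dict.getD_insert, List.count_append]
        split_ifs with hx
        · subst hx; simp [hp]
        · simp [Ne.symm hx, hinv x]
    show (rest.foldl aStep (aStep (cnt, mc, mf) c)).2 = (rest.foldl mStep (mStep (p, mc, mf) c)).2
    simp only [aStep, mStep]
    rw [hgetD c]
    by_cases h : ((p ++ [c]).count c : Int) > mc
    · rw [if_pos h, if_pos h]
      exact ih _ _ _ _ hgetD
    · rw [if_neg h, if_neg h]
      exact ih _ _ _ _ hgetD

lemma bLoop_eq_bLoopL (l : List Char) :
    ∀ (m : Int) (d : PySem.Dict Char Int) (seen : List Char),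
      (∀ x, d.getD x 0 = (seen.count x : Int)) →
      bLoop m d l = bLoopL m seen l := by
  induction l with
  | nil => intro _ _ _ _; rfl
  | cons c rest ih =>
    intro m d seen hinv
    have hgetD : ∀ x, (d.insert c (d.getD c 0 + 1)).getD x 0 = ((seen ++ [c]).count x : Int) := by
      intro x
      rw [PySem.Dict.getD_insert, List.count_append]
      split_ifs with hx
      · subst hx; simp [hinv x]
      · simp [Ne.symm hx, hinv x]
    simp only [bLoop, bLoopL]
    rw [hgetD c]
    by_cases h : ((seen ++ [c]).count c : Int) = m
    · rw [if_pos h, if_pos h]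
    · rw [if_neg h, if_neg h]
      exact ih _ _ _ hgetD

lemma singleton_ne_empty (c : Char) : String.ofList [c] ≠ "" := by
  intro h
  have := congrArg String.toList h
  simp at this

lemma bLoopL_append (xs : List Char) : ∀ (m : Int) (seen ys : List Char),
    bLoopL m seen (xs ++ ys) =
      if bLoopL m seen xs = "" then bLoopL m (seen ++ xs) ys else bLoopL m seen xs := by
  induction xs with
  | nil => intro m seen ys; simp [bLoopL]
  | cons c rest ih =>
    intro m seen ys
    simp only [List.cons_append, bLoopL]
    by_cases h : ((seen ++ [c]).count c : Int) = m
    · rw [if_pos h, if_pos h, if_neg (singleton_ne_empty c)]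
    · rw [if_neg h, if_neg h, ih]
      by_cases h2 : bLoopL m (seen ++ [c]) rest = ""
      · rw [if_pos h2, if_pos h2]
        simp only [List.append_assoc, List.singleton_append]
      · rw [if_neg h2, if_neg h2]

lemma bLoopL_miss (l : List Char) : ∀ (seen : List Char) (m : Int),
    (∀ c, (((seen ++ l).count c : Int)) < m) → bLoopL m seen l = "" := by
  induction l with
  | nil => intro _ _ _; rfl
  | cons c rest ih =>
    intro seen m h
    have hkey : seen ++ c :: rest = (seen ++ [c]) ++ rest := by simp
    have hlt : (((seen ++ [c]).count c : Int)) < m := by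
      have := h c
      rw [hkey] at this
      have hle : ((seen ++ [c]).count c) ≤ (((seen ++ [c]) ++ rest).count c) := by
        simp [List.count_append]
      omega
    simp only [bLoopL]
    rw [if_neg (by omega)]
    apply ih (seen ++ [c]) m
    intro x
    have := h x
    rw [hkey] at this
    exact this

lemma model_props (l : List Char) :
    (l.foldl mStep ([], 0, "")).1 = l ∧
    (∀ x : Char, ((l.count x : Int)) ≤ (l.foldl mStep ([], 0, "")).2.1) ∧
    (l = [] → (l.foldl mStep ([], 0, "")).2.1 = 0) ∧
    (l ≠ [] → ∃ c, c ∈ l ∧ ((l.count c : Int)) = (l.foldl mStep ([], 0, "")).2.1) ∧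
    (l ≠ [] → ∃ c, (l.foldl mStep ([], 0, "")).2.2 = String.ofList [c]) ∧
    bLoopL (l.foldl mStep ([], 0, "")).2.1 [] l = (l.foldl mStep ([], 0, "")).2.2 := by
  induction l using List.reverseRecOn with
  | nil => refine ⟨rfl, by simp, fun _ => rfl, by simp, by simp, rfl⟩
  | append_singleton l a ih =>
    obtain ⟨h1, h2, h3, h4, h5, h6⟩ := ih
    rw [List.foldl_append]
    set r := l.foldl mStep ([], (0 : Int), "") with hr
    simp only [List.foldl_cons, List.foldl_nil]
    have hv : ((l ++ [a]).count a : Int) = (l.count a : Int) + 1 := by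
      simp [List.count_append]
    by_cases hgt : ((l ++ [a]).count a : Int) > r.2.1
    · -- new maximum: the model's result becomes a
      have hstep : mStep r a = (l ++ [a], ((l ++ [a]).count a : Int), String.ofList [a]) := by
        simp only [mStep, h1]; rw [if_pos hgt]
      rw [hstep]
      refine ⟨rfl, ?_, by simp, ?_, fun _ => ⟨a, rfl⟩, ?_⟩
      · intro x
        show ((l ++ [a]).count x : Int) ≤ ((l ++ [a]).count a : Int)
        by_cases hx : x = a
        · subst hx; omega
        · have := h2 x
          have hcx : (l ++ [a]).count x = l.count x := by
            simp [List.count_append, Ne.symm hx]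
          rw [hcx]; omega
      · exact fun _ => ⟨a, by simp, rfl⟩
      · show bLoopL _ [] (l ++ [a]) = String.ofList [a]
        rw [bLoopL_append l _ [] [a]]
        rw [bLoopL_miss l [] _ (by intro c; have := h2 c; simp only [List.nil_append]; omega)]
        simp [bLoopL]
    · -- old maximum, result kept
      have hstep : mStep r a = (l ++ [a], r.2.1, r.2.2) := by
        simp only [mStep, h1]; rw [if_neg hgt]
      have hM1 : 1 ≤ r.2.1 := by have := Nat.zero_le (l.count a); omega
      have hlne : l ≠ [] := by
        intro he; rw [h3 he] at hM1; omega
      obtain ⟨c0, hc0mem, hc0⟩ := h4 hlne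
      obtain ⟨c1, hc1⟩ := h5 hlne
      rw [hstep]
      refine ⟨rfl, ?_, by simp, ?_, fun _ => ⟨c1, hc1⟩, ?_⟩
      · intro x
        show ((l ++ [a]).count x : Int) ≤ r.2.1
        by_cases hx : x = a
        · subst hx; omega
        · have := h2 x
          have hcx : (l ++ [a]).count x = l.count x := by
            simp [List.count_append, Ne.symm hx]
          rw [hcx]; omega
      · intro _
        have hca : c0 ≠ a := by
          intro he
          rw [he] at hc0
          omega
        refine ⟨c0, by simp [hc0mem], ?_⟩
        show ((l ++ [a]).count c0 : Int) = r.2.1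
        have hcx : (l ++ [a]).count c0 = l.count c0 := by
          simp [List.count_append, Ne.symm hca]
        rw [hcx]; exact hc0
      · show bLoopL r.2.1 [] (l ++ [a]) = r.2.2
        rw [bLoopL_append l _ [] [a]]
        rw [if_neg (by rw [h6, hc1]; exact singleton_ne_empty c1)]
        exact h6

-- B's m (max of the frequency dict's values) equals the model's max_count
lemma m_eq_M (l : List Char) (hne : l ≠ []) :
    ((PySem.List.max? (PySem.Dict.counter l).values (fun x => x)).getD 0)
      = (l.foldl mStep ([], 0, "")).2.1 := by
  obtain ⟨_, h2, _, h4, _, _⟩ := model_props l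
  set M := (l.foldl mStep ([], 0, "")).2.1
  obtain ⟨c0, hc0mem, hc0⟩ := h4 hne
  have hvals : (PySem.Dict.counter l).values
      = (PySem.Set.ofList l).map (fun k => (l.count k : Int)) := by
    simp [PySem.Dict.values, PySem.Dict.items_counter]
  have hvalne : (PySem.Dict.counter l).values ≠ [] := by
    rw [hvals]
    simp only [ne_eq, List.map_eq_nil_iff]
    intro he
    exact hne (by simpa [he] using (PySem.Set.mem_ofList l c0).mpr hc0mem)
  obtain ⟨m0, hm0⟩ : ∃ m0, PySem.List.max? (PySem.Dict.counter l).values (fun x => x) = some m0 := by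
    cases hx : PySem.List.max? (PySem.Dict.counter l).values (fun x => x) with
    | none => exact absurd ((PySem.List.max?_eq_none_iff _ _).mp hx) hvalne
    | some m0 => exact ⟨m0, rfl⟩
  have hmem := PySem.List.max?_mem hm0
  have hmax := PySem.List.max?_isMax hm0
  rw [hm0]
  simp only [Option.getD_some]
  rw [hvals] at hmem hmax
  obtain ⟨c2, _, hc2⟩ := List.mem_map.mp hmem
  have hle : m0 ≤ M := by rw [← hc2]; exact h2 c2
  have hge : M ≤ m0 := by
    have hmm : (l.count c0 : Int) ∈ (PySem.Set.ofList l).map (fun k => (l.count k : Int)) :=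
      List.mem_map.mpr ⟨c0, (PySem.Set.mem_ofList l c0).mpr hc0mem, rfl⟩
    have := hmax _ hmm
    omega
  omega

-- ===== VERDICT (by name: the statement is the Claim_ definition above) =====
theorem most_frequent_letter_spec : Claim_equal_most_frequent_letter := by
  intro s _
  unfold Spec_most_frequent_letter most_frequent_letter most_frequent_letter_alt
  have hA : (s.toList.foldl aStep (PySem.Dict.empty, 0, "")).2
      = (s.toList.foldl mStep ([], 0, "")).2 := by
    apply aStep_eq_mStep
    intro x; simp [PySem.Dict.getD_empty]
  by_cases hne : s.toList = []
  · simp [hne]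
  · simp only [if_neg hne]
    obtain ⟨_, _, _, _, _, h6⟩ := model_props s.toList
    rw [congrArg Prod.snd hA]
    rw [PySem.Dict.foldl_insert_getD_add_one_eq_counter, m_eq_M s.toList hne]
    rw [bLoop_eq_bLoopL s.toList _ PySem.Dict.empty []
      (by intro x; simp [PySem.Dict.getD_empty])]
    exact h6.symm
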